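-- pv_equiv track=rewrite | github.com/pratishthakapoor/FoobarChallenge | google_foobar/disorderly_escape.py | cyclecount
-- ===== SOURCE A (Python) =====
-- from collections import Counter
--
-- def factorial(x, fact):
--     return fact[x-1]
--
-- def coefficientFactor(partition, n, fact):
--     c = factorial(n, fact)
--     for a, b in Counter(partition).items():
--         c //=(a**b)*factorial(b, fact)
--     return c
--
-- def cyclecount(n, fact):
--     l = 0
--     p =n*[0]
--     p[0] = n
--     result = []
--     a = [0 for i in range(n+1)]
--     l = 1
--     y = n-1
--     while l != 0:
--         x = a[l-1] +1
--         l -= 1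
--         while 2 * x <=y:
--             a[l] = x
--             y -= x
--             l += 1
--         k = l + 1
--         while x <= y:
--             a[l] = x
--             a[k] = y
--             partition = a[:l+2]
--             result.append((partition, coefficientFactor(partition, n, fact)))
--             x += 1
--             y -= 1
--         a[l] = x+ y
--         y = x + y -1
--         partition = a[:l+1]
--         result.append((partition, coefficientFactor(partition, n, fact)))
--     return result
-- ===== SOURCE B (Python) =====
-- from collections import Counter
--
-- def coefficientFactor(partition, n, fact):
--     c = fact[n - 1]
--     for a, b in Counter(partition).items():
--         c //= (a ** b) * fact[b - 1]
--     return c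
--
-- def cyclecount(n, fact):
--     def parts(rem, lo):
--         if rem == 0:
--             yield []
--             return
--         for p in range(lo, rem + 1):
--             for tail in parts(rem - p, p):
--                 yield [p] + tail
--     result = []
--     for partition in parts(n, 1):
--         result.append((partition, coefficientFactor(partition, n, fact)))
--     return result
-- ===== Notes on version B (the rewrite author's own statement) =====
-- stated objective: alternative
-- what changed: The in-place accelAsc array-mutation loop (three nested whiles over a shared buffer) is replaced by a recursive smallest-part-first partition generator f(rem, lo) that yields the same ascending partitions in the same order; the Counter-based coefficient formula is reused unchanged.
import Mathlib
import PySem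

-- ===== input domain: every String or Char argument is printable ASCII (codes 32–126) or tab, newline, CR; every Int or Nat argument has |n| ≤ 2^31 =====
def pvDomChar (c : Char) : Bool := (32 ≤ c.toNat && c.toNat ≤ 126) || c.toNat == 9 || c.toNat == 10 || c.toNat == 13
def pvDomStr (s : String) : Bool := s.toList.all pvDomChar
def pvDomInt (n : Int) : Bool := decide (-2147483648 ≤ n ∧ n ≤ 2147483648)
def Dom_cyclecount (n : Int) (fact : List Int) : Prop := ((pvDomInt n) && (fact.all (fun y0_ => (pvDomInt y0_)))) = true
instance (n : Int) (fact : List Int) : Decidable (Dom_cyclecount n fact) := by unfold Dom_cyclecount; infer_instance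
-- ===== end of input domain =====

-- B replaces A's in-place accelAsc array loop by a recursive smallest-part-first partition
-- generator (same output order), reusing the same Counter-based coefficient formula.


-- ===== PORT A =====
-- factorial(x, fact) = fact[x-1]  (helper shared by both ports: B's Python reuses the
-- same coefficientFactor verbatim)
def pvFactorial (x : Int) (fact : List Int) : Int :=
  PySem.List.pyGetD fact (x - 1) 0

-- coefficientFactor(partition, n, fact): Counter iteration in first-occurrence order
def pvCoeff (partition : List Int) (n : Int) (fact : List Int) : Int :=
  (PySem.Dict.counter partition).items.foldl
    (fun c ab => PySem.Int.floordiv c (ab.1 ^ ab.2.toNat * pvFactorial ab.2 fact))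
    (pvFactorial n fact)

-- 'while 2 * x <= y: a[l] = x; y -= x; l += 1'  (the '1 ≤ x' conjunct is a totality
-- guard only: with x ≤ 0 the Python loop never terminates; under Pre_ x ≥ 1 always)
def pvInner1 (a : List Int) (l : Nat) (x y : Int) : List Int × Nat × Int :=
  if 2 * x ≤ y ∧ 1 ≤ x then pvInner1 (a.set l x) (l + 1) x (y - x) else (a, l, y)
termination_by (y - x).toNat
decreasing_by omega

-- 'while x <= y: a[l] = x; a[k] = y; emit a[:l+2]; x += 1; y -= 1'
def pvInner2 (n : Int) (fact : List Int) (a : List Int) (l k : Nat) (x y : Int)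
    (res : List (List Int × Int)) : List Int × Int × Int × List (List Int × Int) :=
  if _h : x ≤ y then
    let a1 := (a.set l x).set k y
    let part := a1.take (l + 2)
    pvInner2 n fact a1 l k (x + 1) (y - 1) (res ++ [(part, pvCoeff part n fact)])
  else (a, x, y, res)
termination_by (y - x + 1).toNat
decreasing_by omega

-- 'while l != 0: …' — fuel recursion; 2^n.toNat + 1 exceeds the partition count p(n),
-- the exact number of outer iterations (proved in the sufficiency lemmas below)
def pvOuter (n : Int) (fact : List Int) : Nat → List Int → Nat → Int → List (List Int × Int) → List (List Int × Int)
  | 0, _, _, _, res => res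
  | fuel + 1, a, l, y, res =>
    if l ≠ 0 then
      let x := PySem.List.pyGetD a ((l : Int) - 1) 0 + 1
      match pvInner1 a (l - 1) x y with
      | (a2, l2, y2) =>
        match pvInner2 n fact a2 l2 (l2 + 1) x y2 res with
        | (a3, x3, y3, res3) =>
          let a4 := a3.set l2 (x3 + y3)
          let part := a4.take (l2 + 1)
          pvOuter n fact fuel a4 l2 (x3 + y3 - 1) (res3 ++ [(part, pvCoeff part n fact)])
    else res

-- Python also builds p = n*[0]; p[0] = n — raising IndexError for n ≤ 0 (excluded by
-- Pre_); p is otherwise dead, so it is not modelled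
def cyclecount (n : Int) (fact : List Int) : List (List Int × Int) :=
  let a := List.replicate (n + 1).toNat (0 : Int)
  pvOuter n fact (2 ^ n.toNat + 1) a 1 (n - 1) []

-- ===== PORT B =====
-- parts(rem, lo): ascending partitions of rem with parts ≥ lo, smallest-part-first
-- (the 'if 1 ≤ p' is a totality guard: Python's generator recurses forever for lo ≤ 0,
-- and B only ever calls parts(n, 1))
def pvParts (rem lo : Int) : List (List Int) :=
  if rem = 0 then [[]]
  else (PySem.List.pyRange lo (rem + 1) 1).attach.flatMap
    (fun p => if _h : 1 ≤ p.1 then (pvParts (rem - p.1) p.1).map (fun t => p.1 :: t) else [])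
termination_by rem.toNat
decreasing_by
  have hm := PySem.List.mem_pyRange_one.mp p.2
  omega

def cyclecount_alt (n : Int) (fact : List Int) : List (List Int × Int) :=
  (pvParts n 1).map (fun part => (part, pvCoeff part n fact))

-- ===== PRECONDITION & SPEC =====
-- Pre_ holds exactly where Python A returns: n ≥ 1 (n ≤ 0 raises IndexError on p[0]=n),
-- fact at least n long (fact[n-1] is read), and no zero at a factorial index that is
-- ever divided by — the multiplicities occurring in partitions of n are 1..n except
-- n-1 (for n ≥ 3), and a zero divisor raises ZeroDivisionError.
def Pre_cyclecount (n : Int) (fact : List Int) : Prop :=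
  1 ≤ n ∧ n ≤ (fact.length : Int) ∧
  ∀ b : Nat, b < n.toNat + 1 → 1 ≤ b → (b ≠ n.toNat - 1 ∨ n = 2) → fact.getD (b - 1) 0 ≠ 0
instance (n : Int) (fact : List Int) : Decidable (Pre_cyclecount n fact) := by
  unfold Pre_cyclecount; infer_instance

def pvWitness_cyclecount : Int × List Int := (4, [1, 2, 6, 24])

def Spec_cyclecount (n : Int) (fact : List Int) (out : List (List Int × Int)) : Prop := out = cyclecount_alt n fact
instance (n : Int) (fact : List Int) (out : List (List Int × Int)) : Decidable (Spec_cyclecount n fact out) := by unfold Spec_cyclecount; infer_instance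

-- ===== CLAIM (what is proved, stated in full; the proofs are below) =====
def Claim_equal_cyclecount : Prop := ∀ (n : Int) (fact : List Int), Dom_cyclecount n fact → Pre_cyclecount n fact → Spec_cyclecount n fact (cyclecount n fact)

-- ===== LEMMAS AND PROOFS =====

-- list bookkeeping for the mutated array
theorem pv_take_succ_set_self (a : List Int) (l : Nat) (v : Int) (h : l < a.length) :
    (a.set l v).take (l+1) = a.take l ++ [v] := by
  rw [List.set_eq_take_append_cons_drop, if_pos h, List.take_append]
  simp [List.length_take, Nat.min_eq_left (Nat.le_of_lt h)]

theorem pv_take_set_of_le (a : List Int) (l i : Nat) (v : Int) (h : l ≤ i) :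
    (a.set i v).take l = a.take l := by
  apply List.ext_getElem
  · simp
  · intro j hj hq
    simp only [List.getElem_take, List.getElem_set]
    rw [if_neg (by simp at hj; omega)]

theorem pv_take_succ_getD (a : List Int) (l : Nat) (h : l < a.length) :
    a.take (l+1) = a.take l ++ [a.getD l 0] := by
  rw [List.take_add_one, List.getElem?_eq_getElem h]
  simp [List.getD, List.getElem?_eq_getElem h]

theorem pv_sum_ge_length (P : List Int) (h : ∀ v ∈ P, 1 ≤ v) : (P.length : Int) ≤ P.sum := by
  induction P with
  | nil => simp
  | cons hd tl ih =>
    have h1 := h hd (by simp)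
    have h2 := ih (fun v hv => h v (by simp [hv]))
    simp only [List.length_cons, List.sum_cons]
    push_cast
    omega

theorem pv_stack_sum (P : List Int) (hpos : ∀ v ∈ P, 0 ≤ v) (htail : ∀ v ∈ P.drop 1, 1 ≤ v) :
    (P.length : Int) - 1 ≤ P.sum := by
  cases P with
  | nil => simp
  | cons hd tl =>
    have h1 := hpos hd (by simp)
    have h2 := pv_sum_ge_length tl (by simpa using htail)
    simp only [List.length_cons, List.sum_cons]
    push_cast
    omega

-- pvParts characterisations
theorem pvParts_eq (rem lo : Int) (h0 : rem ≠ 0) :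
    pvParts rem lo = (PySem.List.pyRange lo (rem + 1) 1).flatMap
      (fun p => if 1 ≤ p then (pvParts (rem - p) p).map (fun t => p :: t) else []) := by
  rw [pvParts, if_neg h0]
  simp [List.flatMap_def]

theorem pvParts_nil (s lo : Int) (h0 : s ≠ 0) (h2 : s < lo) : pvParts s lo = [] := by
  rw [pvParts_eq s lo h0, PySem.List.pyRange_one_eq_nil (by omega)]
  rfl

theorem pvParts_split (s x : Int) (h1 : 1 ≤ x) (hx : x ≤ s) :
    pvParts s x = (pvParts (s - x) x).map (fun t => x :: t) ++ pvParts s (x+1) := by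
  have h0 : s ≠ 0 := by omega
  rw [pvParts_eq s x h0, PySem.List.pyRange_one_cons (by omega)]
  rw [List.flatMap_cons, if_pos h1]
  congr 1
  by_cases h0' : s = 0
  · omega
  · rw [pvParts_eq s (x+1) h0']

theorem pvParts_single_aux : ∀ (k : Nat) (s x : Int), (s - x).toNat = k → 1 ≤ x → x ≤ s → s < 2*x →
    pvParts s x = [[s]] := by
  intro k
  induction k using Nat.strong_induction_on with
  | _ k ih =>
    intro s x hk h1 hle hlt
    rw [pvParts_split s x h1 hle]
    rcases eq_or_lt_of_le hle with heq | hlt2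
    · subst heq
      rw [show x - x = (0:Int) by ring]
      rw [pvParts, if_pos rfl, pvParts_nil x (x+1) (by omega) (by omega)]
      simp
    · rw [pvParts_nil (s - x) x (by omega) (by omega)]
      rw [ih (s - (x+1)).toNat (by omega) s (x+1) rfl (by omega) (by omega) (by omega)]
      simp

theorem pvParts_single (s x : Int) (h1 : 1 ≤ x) (hle : x ≤ s) (hlt : s < 2*x) :
    pvParts s x = [[s]] :=
  pvParts_single_aux (s - x).toNat s x rfl h1 hle hlt

theorem pvParts_len_aux : ∀ (k : Nat) (s lo : Int), (s + 1 - lo).toNat = k → 1 ≤ lo →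
    (pvParts s lo).length ≤ 2 ^ (s + 1 - lo).toNat := by
  intro k
  induction k using Nat.strong_induction_on with
  | _ k ih =>
    intro s lo hk h1
    by_cases h0 : s = 0
    · subst h0
      rw [pvParts, if_pos rfl]
      simp [Nat.one_le_two_pow]
    · by_cases hlt : s < lo
      · rw [pvParts_nil s lo h0 hlt]
        simp
      · rw [pvParts_split s lo h1 (by omega)]
        have e1 : (pvParts (s - lo) lo).length ≤ 2 ^ (s - lo + 1 - lo).toNat :=
          ih (s - lo + 1 - lo).toNat (by omega) (s - lo) lo rfl h1
        have e2 : (pvParts s (lo + 1)).length ≤ 2 ^ (s + 1 - (lo + 1)).toNat :=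
          ih (s + 1 - (lo + 1)).toNat (by omega) s (lo + 1) rfl (by omega)
        have m1 : 2 ^ (s - lo + 1 - lo).toNat ≤ 2 ^ (s - lo).toNat :=
          Nat.pow_le_pow_right (by omega) (by omega)
        have m2 : 2 ^ (s + 1 - (lo + 1)).toNat ≤ 2 ^ (s - lo).toNat :=
          Nat.pow_le_pow_right (by omega) (by omega)
        have hsplit : (s + 1 - lo).toNat = (s - lo).toNat + 1 := by omega
        rw [List.length_append, List.length_map, hsplit, pow_succ]
        omega

theorem pvParts_len (s lo : Int) (h1 : 1 ≤ lo) :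
    (pvParts s lo).length ≤ 2 ^ (s + 1 - lo).toNat :=
  pvParts_len_aux (s + 1 - lo).toNat s lo rfl h1

-- the remaining-output spec: pvRem (reversed stack) y, and the mid-iteration form
def pvEmit (n : Int) (fact : List Int) (ps : List (List Int)) : List (List Int × Int) :=
  ps.map (fun p => (p, pvCoeff p n fact))

def pvRem : List Int → Int → List (List Int)
  | [], _ => []
  | b :: rest, y => (pvParts (b + 1 + y) (b + 1)).map (fun t => rest.reverse ++ t) ++ pvRem rest (y + b)

def pvMid (P : List Int) (x y : Int) : List (List Int) :=
  (pvParts (x + y) x).map (fun t => P ++ t) ++ pvRem P.reverse (x + y - 1)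

theorem pvMid_push (P : List Int) (x y : Int) (hx : 1 ≤ x) (hy : 0 ≤ y) :
    pvMid (P ++ [x]) x (y - x) = pvMid P x y := by
  unfold pvMid
  rw [pvParts_split (x + y) x hx (by omega)]
  rw [show x + (y - x) = y by ring]
  simp only [List.reverse_append, List.reverse_cons, List.reverse_nil, List.nil_append,
    List.cons_append, List.nil_append]
  rw [pvRem]
  rw [show x + 1 + (y - 1) = x + y by ring, show y - 1 + x = x + y - 1 by ring,
    show x + y - x = y by ring, List.reverse_reverse, List.map_append, List.map_map,
    List.append_assoc]
  congr 1
  apply List.map_congr_left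
  intro t _
  simp

theorem pvMid_pair (P : List Int) (x y : Int) (hx : 1 ≤ x) (hxy : x ≤ y) (hyx : y < 2*x) :
    pvMid P x y = (P ++ [x, y]) :: pvMid P (x+1) (y-1) := by
  unfold pvMid
  rw [pvParts_split (x + y) x hx (by omega), show x + y - x = y by ring,
    pvParts_single y x hx hxy hyx]
  rw [show x + 1 + (y - 1) = x + y by ring]
  simp

theorem pvMid_final (P : List Int) (x y : Int) (hx : 1 ≤ x) (hy : 0 ≤ y) (hlt : y < x) :
    pvMid P x y = (P ++ [x + y]) :: pvRem P.reverse (x + y - 1) := by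
  unfold pvMid
  rw [pvParts_single (x + y) x hx (by omega) (by omega)]
  simp

theorem pvRem_pop (a : List Int) (l : Nat) (y : Int) (hl : 1 ≤ l) (hlen : l - 1 < a.length) :
    pvRem (a.take l).reverse y = pvMid (a.take (l-1)) (a.getD (l-1) 0 + 1) y := by
  have h : a.take l = a.take (l-1) ++ [a.getD (l-1) 0] := by
    have := pv_take_succ_getD a (l-1) hlen
    rwa [show l - 1 + 1 = l by omega] at this
  rw [h]
  simp only [List.reverse_append, List.reverse_cons, List.reverse_nil, List.nil_append,
    List.cons_append]
  rw [pvRem, List.reverse_reverse]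
  unfold pvMid
  rw [show a.getD (l-1) 0 + 1 + y = a.getD (l-1) 0 + 1 + y by ring,
    show y + a.getD (l-1) 0 = a.getD (l-1) 0 + 1 + y - 1 by ring]


-- loop correctness
theorem pvInner1_spec' : ∀ (fl : Nat) (a : List Int) (l : Nat) (x y : Int), (y - x).toNat = fl →
    1 ≤ x → 0 ≤ y →
    (∀ v ∈ a.take l, 0 ≤ v) → (∀ v ∈ (a.take l).drop 1, 1 ≤ v) →
    ((a.take l).sum + x + y + 1 = (a.length : Int)) →
    ∃ a2 l2 y2, pvInner1 a l x y = (a2, l2, y2) ∧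
      a2.length = a.length ∧ 0 ≤ y2 ∧ y2 < 2*x ∧
      (∀ v ∈ a2.take l2, 0 ≤ v) ∧ (∀ v ∈ (a2.take l2).drop 1, 1 ≤ v) ∧
      (a2.take l2).sum + x + y2 + 1 = (a2.length : Int) ∧
      pvMid (a2.take l2) x y2 = pvMid (a.take l) x y := by
  intro fl
  induction fl using Nat.strong_induction_on with
  | _ fl ih =>
    intro a l x y hfl hx hy hpos htail hsum
    by_cases hc : 2 * x ≤ y ∧ 1 ≤ x
    · -- one push
      have hlb : ((a.take l).length : Int) - 1 ≤ (a.take l).sum := pv_stack_sum _ hpos htail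
      have hlenle : (a.take l).length = min l a.length := List.length_take ..
      have hl : l < a.length := by
        rcases Nat.lt_or_ge l a.length with h | h
        · exact h
        · exfalso
          rw [List.take_of_length_le h] at hlb hsum
          have : (a.length : Int) ≤ (a.length : Int) - 1 + x + y + 1 := by omega
          omega
      have hset : (a.set l x).take (l+1) = a.take l ++ [x] := pv_take_succ_set_self a l x hl
      have hpos' : ∀ v ∈ (a.set l x).take (l+1), 0 ≤ v := by
        rw [hset]; intro v hv
        rcases List.mem_append.mp hv with h | h
        · exact hpos v h
        · simp at h; omega
      have htail' : ∀ v ∈ ((a.set l x).take (l+1)).drop 1, 1 ≤ v := by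
        rw [hset]
        intro v hv
        cases hP : a.take l with
        | nil => rw [hP] at hv; simp at hv
        | cons hd tl =>
          rw [hP] at hv
          simp only [List.cons_append, List.drop_succ_cons, List.drop_zero] at hv
          rcases List.mem_append.mp hv with h | h
          · exact htail v (by rw [hP]; simpa using h)
          · simp at h; omega
      have hsum' : ((a.set l x).take (l+1)).sum + x + (y - x) + 1 = ((a.set l x).length : Int) := by
        rw [hset]; simp only [List.sum_append, List.sum_cons, List.sum_nil, List.length_set]
        omega
      obtain ⟨a2, l2, y2, heq, hrest⟩ :=
        ih (y - x - x).toNat (by omega) (a.set l x) (l+1) x (y - x) rfl hx (by omega) hpos' htail' hsum'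
      refine ⟨a2, l2, y2, ?_, ?_, hrest.2.1, hrest.2.2.1, hrest.2.2.2.1, hrest.2.2.2.2.1, ?_, ?_⟩
      · rw [pvInner1, if_pos hc]; exact heq
      · rw [hrest.1]; simp
      · rw [hrest.2.2.2.2.2.1, hrest.1]
      · rw [hrest.2.2.2.2.2.2, hset]
        exact pvMid_push (a.take l) x y hx hy
    · refine ⟨a, l, y, ?_, rfl, hy, by omega, hpos, htail, hsum, rfl⟩
      rw [pvInner1, if_neg hc]

theorem pvInner1_spec (a : List Int) (l : Nat) (x y : Int)
    (hx : 1 ≤ x) (hy : 0 ≤ y)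
    (hpos : ∀ v ∈ a.take l, 0 ≤ v) (htail : ∀ v ∈ (a.take l).drop 1, 1 ≤ v)
    (hsum : (a.take l).sum + x + y + 1 = (a.length : Int)) :
    ∃ a2 l2 y2, pvInner1 a l x y = (a2, l2, y2) ∧
      a2.length = a.length ∧ 0 ≤ y2 ∧ y2 < 2*x ∧
      (∀ v ∈ a2.take l2, 0 ≤ v) ∧ (∀ v ∈ (a2.take l2).drop 1, 1 ≤ v) ∧
      (a2.take l2).sum + x + y2 + 1 = (a2.length : Int) ∧
      pvMid (a2.take l2) x y2 = pvMid (a.take l) x y :=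
  pvInner1_spec' (y - x).toNat a l x y rfl hx hy hpos htail hsum

theorem pvInner2_spec' : ∀ (fl : Nat) (n : Int) (fact : List Int) (a : List Int) (l : Nat)
    (x y : Int) (res : List (List Int × Int)), (y - x + 1).toNat = fl →
    1 ≤ x → 0 ≤ y → y < 2*x →
    (∀ v ∈ a.take l, 0 ≤ v) → (∀ v ∈ (a.take l).drop 1, 1 ≤ v) →
    ((a.take l).sum + x + y + 1 = (a.length : Int)) →
    ∃ a3 x3 y3 res3, pvInner2 n fact a l (l+1) x y res = (a3, x3, y3, res3) ∧
      a3.length = a.length ∧ a3.take l = a.take l ∧ 1 ≤ x3 ∧ 0 ≤ y3 ∧ y3 < x3 ∧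
      x3 + y3 = x + y ∧
      (a3.take l).sum + x3 + y3 + 1 = (a3.length : Int) ∧
      ∃ E, pvMid (a.take l) x y = E ++ pvMid (a.take l) x3 y3 ∧
        res3 = res ++ pvEmit n fact E := by
  intro fl
  induction fl using Nat.strong_induction_on with
  | _ fl ih =>
    intro n fact a l x y res hfl hx hy hyx hpos htail hsum
    by_cases hc : x ≤ y
    · have hlb : ((a.take l).length : Int) - 1 ≤ (a.take l).sum := pv_stack_sum _ hpos htail
      have hl1 : l + 1 < a.length := by
        rcases Nat.lt_or_ge l a.length with h | h
        · rw [List.length_take, Nat.min_eq_left (Nat.le_of_lt h)] at hlb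
          by_contra hcon
          have : l + 1 ≥ a.length := by omega
          omega
        · exfalso
          rw [List.take_of_length_le h] at hlb hsum
          omega
      have hl : l < a.length := by omega
      have hset1 : (a.set l x).take (l+1) = a.take l ++ [x] := pv_take_succ_set_self a l x hl
      have hset2 : ((a.set l x).set (l+1) y).take (l+2) = a.take l ++ [x, y] := by
        have := pv_take_succ_set_self (a.set l x) (l+1) y (by simpa using hl1)
        rw [show l + 1 + 1 = l + 2 by omega] at this
        rw [this, hset1]
        simp
      have htake : ((a.set l x).set (l+1) y).take l = a.take l := by
        rw [pv_take_set_of_le _ l (l+1) y (by omega), pv_take_set_of_le _ l l x (by omega)]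
      have hlen1 : ((a.set l x).set (l+1) y).length = a.length := by simp
      obtain ⟨a3, x3, y3, res3, heq, hle3, htk3, hx3, hy3, hyx3, hxy3, hsum3, E', hmidE, hresE⟩ :=
        ih (y - 1 - (x + 1) + 1).toNat (by omega) n fact ((a.set l x).set (l+1) y) l (x+1) (y-1)
          (res ++ [(a.take l ++ [x, y], pvCoeff (a.take l ++ [x, y]) n fact)]) rfl
          (by omega) (by omega) (by omega)
          (by rw [htake]; exact hpos) (by rw [htake]; exact htail)
          (by rw [htake, hlen1]; omega)
      rw [htake] at htk3 hmidE
      refine ⟨a3, x3, y3, res3, ?_, by rw [hle3, hlen1], htk3, hx3, hy3, hyx3, by omega,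
        by rw [hle3, hlen1] at hsum3 ⊢; exact hsum3, (a.take l ++ [x, y]) :: E', ?_, ?_⟩
      · rw [pvInner2, dif_pos hc]
        simp only [hset2]
        exact heq
      · rw [pvMid_pair (a.take l) x y hx hc hyx, hmidE]
        simp
      · rw [hresE]
        simp [pvEmit]
    · refine ⟨a, x, y, res, ?_, rfl, rfl, hx, hy, by omega, rfl, hsum, [], by simp, by simp [pvEmit]⟩
      rw [pvInner2, dif_neg hc]

theorem pvOuter_spec' : ∀ (fuel : Nat) (n : Int) (fact : List Int) (a : List Int) (l : Nat)
    (y : Int) (res : List (List Int × Int)),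
    0 ≤ y →
    (∀ v ∈ a.take l, 0 ≤ v) → (∀ v ∈ (a.take l).drop 1, 1 ≤ v) →
    ((a.take l).sum + y + 2 = (a.length : Int)) →
    (pvRem (a.take l).reverse y).length < fuel →
    pvOuter n fact fuel a l y res = res ++ pvEmit n fact (pvRem (a.take l).reverse y) := by
  intro fuel
  induction fuel with
  | zero => intro n fact a l y res _ _ _ _ hfuel; omega
  | succ fuel ih =>
    intro n fact a l y res hy hpos htail hsum hfuel
    by_cases hl0 : l = 0
    · subst hl0
      simp only [pvOuter, ne_eq, not_true_eq_false, if_false, List.take_zero]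
      simp [pvRem, pvEmit]
    · have hlb : ((a.take l).length : Int) - 1 ≤ (a.take l).sum := pv_stack_sum _ hpos htail
      have hllen : l - 1 < a.length := by
        by_contra hcon
        have he : a.take l = a := List.take_of_length_le (by omega)
        rw [he] at hlb hsum
        omega
      have htk : a.take l = a.take (l-1) ++ [a.getD (l-1) 0] := by
        have := pv_take_succ_getD a (l-1) hllen
        rwa [show l - 1 + 1 = l by omega] at this
      set b := a.getD (l-1) 0 with hbdef
      have hb0 : 0 ≤ b := hpos b (by rw [htk]; simp)
      have hpop : pvRem (a.take l).reverse y = pvMid (a.take (l-1)) (b+1) y :=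
        pvRem_pop a l y (by omega) hllen
      -- inner1
      have hpos1 : ∀ v ∈ a.take (l-1), 0 ≤ v := by
        intro v hv; exact hpos v (by rw [htk]; exact List.mem_append_left _ hv)
      have htail1 : ∀ v ∈ (a.take (l-1)).drop 1, 1 ≤ v := by
        intro v hv
        apply htail
        rw [htk]
        cases hq : a.take (l-1) with
        | nil => rw [hq] at hv; simp at hv
        | cons hd tl =>
          rw [hq] at hv
          simp only [List.cons_append, List.drop_succ_cons, List.drop_zero] at hv ⊢
          exact List.mem_append_left _ hv
      have hsum1 : (a.take (l-1)).sum + (b+1) + y + 1 = (a.length : Int) := by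
        rw [htk] at hsum; simp only [List.sum_append, List.sum_cons, List.sum_nil] at hsum
        omega
      obtain ⟨a2, l2, y2, heq1, hlen2, hy2, hy2x, hpos2, htail2, hsum2, hmid1⟩ :=
        pvInner1_spec a (l-1) (b+1) y (by omega) hy hpos1 htail1 hsum1
      -- inner2
      obtain ⟨a3, x3, y3, res3, heq2, hlen3, htk3, hx3, hy3, hyx3, hxy3, hsum3, E, hmidE, hresE⟩ :=
        pvInner2_spec' (y2 - (b+1) + 1).toNat n fact a2 l2 (b+1) y2 res rfl (by omega) hy2 hy2x
          hpos2 htail2 hsum2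
      -- final write
      have hpos3 : ∀ v ∈ a3.take l2, 0 ≤ v := by rw [htk3]; exact hpos2
      have htail3 : ∀ v ∈ (a3.take l2).drop 1, 1 ≤ v := by rw [htk3]; exact htail2
      have hlb3 : ((a3.take l2).length : Int) - 1 ≤ (a3.take l2).sum := pv_stack_sum _ hpos3 htail3
      have hsum3' : (a3.take l2).sum + x3 + y3 + 1 = (a3.length : Int) := hsum3
      have hl2 : l2 < a3.length := by
        rcases Nat.lt_or_ge l2 a3.length with h | h
        · exact h
        · rw [List.take_of_length_le h] at hlb3 hsum3'
          omega
      have hset4 : (a3.set l2 (x3+y3)).take (l2+1) = a3.take l2 ++ [x3+y3] :=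
        pv_take_succ_set_self a3 l2 (x3+y3) hl2
      have htk4 : (a3.set l2 (x3+y3)).take l2 = a3.take l2 := pv_take_set_of_le a3 l2 l2 _ (by omega)
      have hmidfin : pvMid (a3.take l2) x3 y3
          = (a3.take l2 ++ [x3+y3]) :: pvRem (a3.take l2).reverse (x3+y3-1) :=
        pvMid_final _ x3 y3 hx3 hy3 hyx3
      -- the remaining-output chain
      have hchain : pvRem (a.take l).reverse y
          = E ++ (a3.take l2 ++ [x3+y3]) :: pvRem (a3.take l2).reverse (x3+y3-1) := by
        rw [hpop, ← hmid1, hmidE, ← htk3, hmidfin]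
      -- recursive call
      have hrec := ih n fact (a3.set l2 (x3+y3)) l2 (x3+y3-1)
        (res3 ++ [(a3.take l2 ++ [x3+y3], pvCoeff (a3.take l2 ++ [x3+y3]) n fact)])
        (by omega)
        (by rw [htk4]; exact hpos3) (by rw [htk4]; exact htail3)
        (by rw [htk4]; simp only [List.length_set]; omega)
        (by
          have := congrArg List.length hchain
          rw [htk4]
          simp only [List.length_append, List.length_cons] at this
          omega)
      -- assemble
      simp only [pvOuter, if_pos hl0]
      have hcast : (l : Int) - 1 = ((l - 1 : Nat) : Int) := by omega
      rw [hcast, PySem.List.pyGetD_natCast]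
      rw [← hbdef, heq1, heq2]
      simp only [hset4]
      rw [hrec, htk4, hchain, hresE]
      simp [pvEmit]

-- ===== VERDICT (by name: the statement is the Claim_ definition above) =====
theorem cyclecount_spec : Claim_equal_cyclecount := by
  intro n fact _hdom hpre
  unfold Spec_cyclecount
  obtain ⟨hn, -, -⟩ := hpre
  have htake1 : (List.replicate (n+1).toNat (0:Int)).take 1 = [0] := by
    rw [show (n+1).toNat = n.toNat + 1 by omega]
    simp [List.replicate_succ]
  have hrem : pvRem (([0] : List Int)).reverse (n-1) = pvParts n 1 := by
    simp [pvRem]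
  have hlen : ((List.replicate (n+1).toNat (0:Int)).length : Int) = n + 1 := by
    simp; omega
  have h0 := pvOuter_spec' (2 ^ n.toNat + 1) n fact (List.replicate (n+1).toNat (0:Int)) 1 (n-1) []
    (by omega)
    (by rw [htake1]; intro v hv; simp at hv; omega)
    (by rw [htake1]; intro v hv; simp at hv)
    (by rw [htake1, hlen]; simp; ring)
    (by
      rw [htake1, hrem]
      have hb := pvParts_len n 1 le_rfl
      rw [show n + 1 - 1 = n by ring] at hb
      omega)
  rw [htake1, hrem] at h0
  show pvOuter n fact (2 ^ n.toNat + 1) (List.replicate (n+1).toNat (0:Int)) 1 (n-1) [] = _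
  rw [h0]
  simp [pvEmit, cyclecount_alt]
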